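-- pv_equiv track=rewrite | github.com/agenta2z/RichPythonUtils | src/rich_python_utils/algorithms/array/time_series.py | find_right_side_max
-- ===== SOURCE A (Python) =====
-- from typing import Sequence, List, Callable, Iterator, Iterable
--
-- def find_right_side_max(arr: List[int]) -> List[int]:
--     """
--     Finds the index of the rightmost maximum value for each element in the list.
--
--     Args:
--         arr (List[int]): The input list of numbers.
--
--     Returns:
--         List[int]: A list where each index `i` contains the index of the maximum value
--                    from `arr[i:]` (including `i`).
--
--     Notes:
--         - **Time Complexity**: O(n) (Single pass from right to left).
--         - **Space Complexity**: O(n) (Stores indices).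
--
--     Example:
--         >>> find_right_side_max([2, 7, 3, 6])
--         [1, 1, 3, 3]
--
--         >>> find_right_side_max([9, 1, 4, 2, 5])
--         [0, 4, 4, 4, 4]
--
--         # Since 4 is the max at every position rightward
--         >>> find_right_side_max([1, 2, 3, 4])
--         [3, 3, 3, 3]
--
--         # Each element is its own max to the right
--         >>> find_right_side_max([5, 4, 3, 2, 1])
--         [0, 1, 2, 3, 4]
--     """
--     n = len(arr)
--     if n == 0:
--         return []
--
--     max_index = [0] * n
--     max_index[-1] = n - 1  # Last element is its own max
--
--     for i in range(n - 2, -1, -1):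
--         if arr[i] > arr[max_index[i + 1]]:
--             max_index[i] = i  # Current element is the new max
--         else:
--             max_index[i] = max_index[i + 1]  # Keep the rightmost max index
--
--     return max_index
-- ===== SOURCE B (Python) =====
-- from typing import List
--
-- def find_right_side_max(arr: List[int]) -> List[int]:
--     n = len(arr)
--     res = []
--     for i in range(n):
--         best = i
--         for j in range(i, n):
--             if arr[j] >= arr[best]:
--                 best = j
--         res.append(best)
--     return res
-- ===== Notes on version B (the rewrite author's own statement) =====
-- stated objective: alternative
-- what changed: Replaces A's single right-to-left accumulating sweep over a preallocated index array with an independent nested scan per position that locates the rightmost maximum of each suffix directly.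
import Mathlib
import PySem

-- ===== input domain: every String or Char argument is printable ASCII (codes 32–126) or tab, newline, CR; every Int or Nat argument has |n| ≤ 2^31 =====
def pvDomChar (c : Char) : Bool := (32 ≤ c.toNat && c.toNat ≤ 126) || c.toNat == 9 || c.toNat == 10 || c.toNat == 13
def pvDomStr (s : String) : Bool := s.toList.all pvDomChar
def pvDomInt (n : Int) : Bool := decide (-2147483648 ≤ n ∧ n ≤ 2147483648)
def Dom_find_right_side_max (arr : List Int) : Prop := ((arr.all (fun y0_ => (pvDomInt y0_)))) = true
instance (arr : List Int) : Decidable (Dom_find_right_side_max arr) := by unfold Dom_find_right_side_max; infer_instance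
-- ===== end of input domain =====

-- B replaces A's single right-to-left accumulating sweep with an independent
-- per-position nested scan of each suffix for its rightmost maximum (objective:
-- alternative decomposition, not faster).

-- ===== PORT A =====
-- body of A's for-loop: max_index[i] = i if arr[i] > arr[max_index[i+1]] else max_index[i+1]
def stepA (arr : List Int) (mi : List Int) (i : Int) : List Int :=
  if PySem.List.pyGetD arr i 0 > PySem.List.pyGetD arr (PySem.List.pyGetD mi (i + 1) 0) 0 then
    mi.set i.toNat i
  else
    mi.set i.toNat (PySem.List.pyGetD mi (i + 1) 0)

def find_right_side_max (arr : List Int) : List Int :=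
  -- n = len(arr)
  if arr.length = 0 then []
  else
    -- max_index = [0] * n ; max_index[-1] = n - 1
    let mi := (List.replicate arr.length (0 : Int)).set (arr.length - 1) ((arr.length : Int) - 1)
    -- for i in range(n - 2, -1, -1): …
    (PySem.List.pyRange ((arr.length : Int) - 2) (-1) (-1)).foldl (stepA arr) mi

-- ===== PORT B =====
def find_right_side_max_alt (arr : List Int) : List Int :=
  -- n = len(arr)
  (PySem.List.pyRange 0 (arr.length : Int) 1).map (fun i =>
    (PySem.List.pyRange i (arr.length : Int) 1).foldl
      (fun best j =>
        if PySem.List.pyGetD arr j 0 ≥ PySem.List.pyGetD arr best 0 then j else best) i)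

-- ===== PRECONDITION & SPEC =====
def Spec_find_right_side_max (arr : List Int) (out : List Int) : Prop := out = find_right_side_max_alt arr
instance (arr : List Int) (out : List Int) : Decidable (Spec_find_right_side_max arr out) := by unfold Spec_find_right_side_max; infer_instance

-- ===== CLAIM (what is proved, stated in full; the proofs are below) =====
def Claim_equal_find_right_side_max : Prop := ∀ (arr : List Int), Dom_find_right_side_max arr → Spec_find_right_side_max arr (find_right_side_max arr)

-- ===== LEMMAS AND PROOFS =====

-- the common mathematical value: index of the rightmost maximum of arr[i:]
def bestIdx (arr : List Int) (i : Nat) : Nat :=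
  if _h : i + 1 < arr.length then
    let b := bestIdx arr (i + 1)
    if PySem.List.pyGetD arr (i : Int) 0 > PySem.List.pyGetD arr (b : Int) 0 then i else b
  else i
termination_by arr.length - i

theorem bestIdx_last (arr : List Int) (i : Nat) (h : ¬ i + 1 < arr.length) :
    bestIdx arr i = i := by
  rw [bestIdx]; simp [h]

theorem bestIdx_recur (arr : List Int) (i : Nat) (h : i + 1 < arr.length) :
    bestIdx arr i =
      if PySem.List.pyGetD arr (i : Int) 0 > PySem.List.pyGetD arr (bestIdx arr (i + 1) : Int) 0
      then i else bestIdx arr (i + 1) := by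
  rw [bestIdx]; simp [h]

theorem bestIdx_ge (arr : List Int) (i : Nat) :
    PySem.List.pyGetD arr (bestIdx arr i : Int) 0 ≥ PySem.List.pyGetD arr (i : Int) 0 := by
  by_cases h : i + 1 < arr.length
  · rw [bestIdx_recur arr i h]; split_ifs <;> omega
  · rw [bestIdx_last arr i h]

-- B's inner left-to-right scan computes bestIdx, for any start value b
theorem scan_eq (arr : List Int) :
    ∀ (fuel i : Nat) (b : Int), i < arr.length → arr.length - i ≤ fuel →
    (PySem.List.pyRange (i : Int) (arr.length : Int) 1).foldl
      (fun best j =>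
        if PySem.List.pyGetD arr j 0 ≥ PySem.List.pyGetD arr best 0 then j else best) b
    = if PySem.List.pyGetD arr (bestIdx arr i : Int) 0 ≥ PySem.List.pyGetD arr b 0
      then ((bestIdx arr i : Nat) : Int) else b := by
  intro fuel
  induction fuel with
  | zero => intro i b h1 h2; omega
  | succ fuel ih =>
    intro i b h1 h2
    by_cases h : i + 1 < arr.length
    · rw [PySem.List.pyRange_one_cons (by exact_mod_cast h1)]
      simp only [List.foldl_cons]
      rw [show ((i : Int) + 1) = ((i + 1 : Nat) : Int) by push_cast; ring]
      rw [ih (i + 1) _ h (by omega)]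
      rw [bestIdx_recur arr i h]
      split_ifs <;> simp_all <;> omega
    · rw [show (arr.length : Int) = (i : Int) + 1 by omega]
      rw [PySem.List.pyRange_one_singleton]
      rw [bestIdx_last arr i h]
      simp

theorem alt_eq (arr : List Int) :
    find_right_side_max_alt arr
      = (List.range arr.length).map (fun i => ((bestIdx arr i : Nat) : Int)) := by
  unfold find_right_side_max_alt
  rw [PySem.List.pyRange_zero_natCast, List.map_map]
  refine List.map_congr_left (fun i hi => ?_)
  have h1 : i < arr.length := List.mem_range.mp hi
  simp only [Function.comp]
  rw [scan_eq arr arr.length i (i : Int) h1 (by omega)]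
  rw [if_pos (bestIdx_ge arr i)]

theorem foldl_stepA_length (arr : List Int) :
    ∀ (l : List Int) (mi : List Int), (l.foldl (stepA arr) mi).length = mi.length := by
  intro l
  induction l with
  | nil => intro mi; rfl
  | cons x l ih =>
    intro mi
    simp only [List.foldl_cons, ih]
    unfold stepA
    split <;> simp

-- one iteration of A's loop writes bestIdx arr i into slot i
theorem stepA_eq (arr : List Int) (mi : List Int) (i : Nat)
    (h1 : i + 1 < arr.length)
    (hprev : mi[i + 1]? = some ((bestIdx arr (i + 1) : Nat) : Int)) :
    stepA arr mi (i : Int) = mi.set i ((bestIdx arr i : Nat) : Int) := by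
  unfold stepA
  have hp : PySem.List.pyGetD mi ((i : Int) + 1) 0 = ((bestIdx arr (i + 1) : Nat) : Int) := by
    rw [show ((i : Int) + 1) = ((i + 1 : Nat) : Int) by push_cast; ring]
    rw [PySem.List.pyGetD_natCast]
    simp [List.getD_eq_getElem?_getD, hprev]
  rw [hp]
  have htn : ((i : Int)).toNat = i := by simp
  have hb := bestIdx_recur arr i h1
  split_ifs with hc
  · rw [htn]; congr 1; rw [hb, if_pos hc]
  · rw [htn]; congr 1; rw [hb, if_neg hc]

theorem loopA (arr : List Int) :
    ∀ (i : Nat) (mi : List Int), i + 1 < arr.length → mi.length = arr.length →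
    (∀ k : Nat, i < k → k < arr.length → mi[k]? = some ((bestIdx arr k : Nat) : Int)) →
    ∀ k : Nat, k < arr.length →
    ((PySem.List.pyRange (i : Int) (-1) (-1)).foldl (stepA arr) mi)[k]?
      = some ((bestIdx arr k : Nat) : Int) := by
  intro i
  induction i with
  | zero =>
    intro mi h1 hlen hinv k hk
    rw [PySem.List.pyRange_neg_one_cons (by simp : (-1 : Int) < ((0 : Nat) : Int))]
    simp only [List.foldl_cons]
    rw [show ((0 : Nat) : Int) - 1 = -1 by simp]
    rw [PySem.List.pyRange_neg_one_eq_nil (le_refl _), List.foldl_nil]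
    rw [stepA_eq arr mi 0 h1 (hinv 1 (by omega) (by omega))]
    by_cases hk0 : k = 0
    · subst hk0; rw [List.getElem?_set_self (by omega)]
    · rw [List.getElem?_set_ne (by omega)]; exact hinv k (by omega) hk
  | succ j ih =>
    intro mi h1 hlen hinv k hk
    rw [PySem.List.pyRange_neg_one_cons (by omega : (-1 : Int) < ((j + 1 : Nat) : Int))]
    simp only [List.foldl_cons]
    rw [stepA_eq arr mi (j + 1) h1 (hinv (j + 2) (by omega) (by omega))]
    rw [show ((j + 1 : Nat) : Int) - 1 = ((j : Nat) : Int) by push_cast; ring]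
    refine ih (mi.set (j + 1) _) (by omega) (by simp [hlen]) ?_ k hk
    intro k' hk1 hk2
    by_cases hkj : k' = j + 1
    · subst hkj; rw [List.getElem?_set_self (by omega)]
    · rw [List.getElem?_set_ne (by omega)]; exact hinv k' (by omega) hk2

-- ===== VERDICT (by name: the statement is the Claim_ definition above) =====
theorem find_right_side_max_spec : Claim_equal_find_right_side_max := by
  unfold Claim_equal_find_right_side_max Spec_find_right_side_max
  intro arr _
  rw [alt_eq]
  unfold find_right_side_max
  by_cases h0 : arr.length = 0
  · simp [h0]
  · rw [if_neg h0]
    by_cases h1 : arr.length = 1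
    · rw [show ((arr.length : Int) - 2) = -1 by omega]
      rw [PySem.List.pyRange_neg_one_eq_nil (by omega), List.foldl_nil]
      rw [h1]
      simp [List.range_succ, bestIdx_last arr 0 (by omega)]
    · apply List.ext_getElem?
      intro k
      by_cases hk : k < arr.length
      · rw [show ((arr.length : Int) - 2) = ((arr.length - 2 : Nat) : Int) by omega]
        rw [loopA arr (arr.length - 2) _ (by omega) (by simp) ?_ k hk]
        · rw [List.getElem?_map, List.getElem?_range hk]; rfl
        · intro k' hk1 hk2
          have hk' : k' = arr.length - 1 := by omega
          subst hk'
          rw [List.getElem?_set_self (by simp; omega)]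
          rw [bestIdx_last arr (arr.length - 1) (by omega)]
          congr 1
          omega
      · rw [List.getElem?_eq_none, List.getElem?_eq_none]
        · simp only [List.length_map, List.length_range]; omega
        · rw [foldl_stepA_length]
          simp only [List.length_set, List.length_replicate]
          omega
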